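-- pv_equiv track=rewrite | github.com/mary-nabih/practical_codes | Q3_code.py | binary_divisible_by_3
-- ===== SOURCE A (Python) =====
-- def binary_divisible_by_3(binary_str):
--     if any(c not in '01' for c in binary_str):
--         return "Error: Please enter a valid binary number (only 0 and 1)."
--
--     state = 0
--     for bit in binary_str:
--         digit = int(bit)
--         state = (state * 2 + digit) % 3
--     return state == 0
-- ===== SOURCE B (Python) =====
-- def binary_divisible_by_3(binary_str):
--     if not set(binary_str) <= {'0', '1'}:
--         return "Error: Please enter a valid binary number (only 0 and 1)."
--     # casting out threes in base 4: group bits in pairs from the right,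
--     # sum the base-4 digits, test the single sum mod 3
--     bits = binary_str[::-1]
--     n = len(bits)
--     total = 0
--     i = 0
--     while i < n:
--         d = 1 if bits[i] == '1' else 0
--         if i + 1 < n and bits[i + 1] == '1':
--             d += 2
--         total += d
--         i += 2
--     return total % 3 == 0
-- ===== Notes on version B (the rewrite author's own statement) =====
-- stated objective: alternative
-- what changed: Replaces A's per-bit Horner DFA (state = (2*state+bit) % 3) by casting out threes in base 4: bits are grouped in pairs from the right, the base-4 digits are summed, and one modulo tests the sum; the validation guard becomes a set-subset check.
import Mathlib
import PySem

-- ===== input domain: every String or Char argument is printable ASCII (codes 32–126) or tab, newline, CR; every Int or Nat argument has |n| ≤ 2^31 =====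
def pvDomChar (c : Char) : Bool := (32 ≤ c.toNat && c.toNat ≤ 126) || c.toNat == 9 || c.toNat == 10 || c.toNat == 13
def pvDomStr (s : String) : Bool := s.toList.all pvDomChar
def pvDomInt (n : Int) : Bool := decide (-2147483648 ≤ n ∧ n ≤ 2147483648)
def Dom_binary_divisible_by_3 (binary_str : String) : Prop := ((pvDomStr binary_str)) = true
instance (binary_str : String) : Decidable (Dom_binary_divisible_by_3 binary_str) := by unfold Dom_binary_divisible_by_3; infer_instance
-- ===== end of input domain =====

-- B replaces A's per-bit Horner DFA by casting out threes in base 4 (pairs of bits from the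
-- right, one digit sum, one mod); objective: alternative, same cost.

-- ===== PORT A =====
-- A: validation guard 'any(c not in "01" …)', then state = (state*2 + int(bit)) % 3 over the
-- bits, return state == 0. On the guard branch Python returns an error STRING (not a Bool);
-- those inputs are outside Pre_ below, and the port returns false there (unreachable in Pre_).
def binary_divisible_by_3 (binary_str : String) : Bool :=
  if binary_str.toList.any (fun c => !(c == '0' || c == '1')) then false
  else
    decide ((binary_str.toList.foldl
      (fun st bit => PySem.Int.mod (st * 2 + (if bit = '1' then (1 : Int) else 0)) 3) 0) = 0)
    -- int(bit): under the guard every bit is '0' or '1', so int(bit) = if bit = '1' then 1 else 0 (exact)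

-- ===== PORT B =====
-- B's while loop over the reversed bits, two positions per step (one base-4 digit), as the
-- obvious two-at-a-time structural recursion; 'total' is the accumulated digit sum.
def pvDigitSum4 : List Char → Int
  | [] => 0
  | [b] => if b = '1' then 1 else 0
  | b0 :: b1 :: rest =>
      (if b0 = '1' then (1 : Int) else 0) + (if b1 = '1' then (2 : Int) else 0)
        + pvDigitSum4 rest

-- B: guard 'not set(binary_str) <= {"0","1"}', then the base-4 digit sum of the reversed
-- bits, one mod 3 at the end.
def binary_divisible_by_3_alt (binary_str : String) : Bool :=
  if !(PySem.Set.issubset (PySem.Set.ofList binary_str.toList) ['0', '1']) then false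
  else decide (PySem.Int.mod (pvDigitSum4 binary_str.toList.reverse) 3 = 0)

-- ===== PRECONDITION & SPEC =====
-- Pre_ excludes strings containing a character other than '0'/'1': there Python A returns an
-- error STRING, not a value of the declared Bool type (B returns the identical string).
def Pre_binary_divisible_by_3 (binary_str : String) : Prop :=
  (binary_str.toList.all (fun c => c == '0' || c == '1')) = true
instance (binary_str : String) : Decidable (Pre_binary_divisible_by_3 binary_str) := by
  unfold Pre_binary_divisible_by_3; infer_instance

def pvWitness_binary_divisible_by_3 : String := "1011"

def Spec_binary_divisible_by_3 (binary_str : String) (out : Bool) : Prop := out = binary_divisible_by_3_alt binary_str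
instance (binary_str : String) (out : Bool) : Decidable (Spec_binary_divisible_by_3 binary_str out) := by unfold Spec_binary_divisible_by_3; infer_instance

-- ===== CLAIM (what is proved, stated in full; the proofs are below) =====
def Claim_equal_binary_divisible_by_3 : Prop := ∀ (binary_str : String), Dom_binary_divisible_by_3 binary_str → Pre_binary_divisible_by_3 binary_str → Spec_binary_divisible_by_3 binary_str (binary_divisible_by_3 binary_str)

-- ===== LEMMAS AND PROOFS =====

-- the bit value of a character ('1' ↦ 1, else 0)
def pvBit (c : Char) : Int := if c = '1' then 1 else 0

-- pure Horner value (A's loop without the mod), big-endian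
def pvHorner (l : List Char) (s : Int) : Int := l.foldl (fun st b => st * 2 + pvBit b) s

-- little-endian value of a bit list
def pvValLE : List Char → Int
  | [] => 0
  | b :: t => pvBit b + 2 * pvValLE t

-- A's loop collapses: folding with a mod at each step equals the pure Horner value mod 3
theorem pvA_fold_mod (l : List Char) (s : Int) :
    l.foldl (fun st b => PySem.Int.mod (st * 2 + pvBit b) 3) (s % 3)
      = pvHorner l s % 3 := by
  induction l generalizing s with
  | nil => simp [pvHorner]
  | cons b t ih =>
    simp only [List.foldl_cons, pvHorner]
    rw [PySem.Int.mod_eq_emod_of_pos (by norm_num)]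
    have h : (s % 3 * 2 + pvBit b) % 3 = (s * 2 + pvBit b) % 3 :=
      (Int.ModEq.mul_right 2 (Int.emod_emod_of_dvd s dvd_rfl)).add_right (pvBit b)
    rw [h, ih (s * 2 + pvBit b)]
    rfl

-- the Horner value is the little-endian value of the reversed list
theorem pvHorner_eq_valLE_reverse (l : List Char) :
    pvHorner l 0 = pvValLE l.reverse := by
  induction l using List.reverseRecOn with
  | nil => simp [pvHorner, pvValLE]
  | append_singleton t b ih =>
    have hH : pvHorner (t ++ [b]) 0 = pvHorner t 0 * 2 + pvBit b := by
      simp [pvHorner]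
    rw [hH, List.reverse_append]
    simp [pvValLE, ih]
    ring

-- casting out threes in base 4: the digit sum agrees with the value mod 3 (4 ≡ 1)
theorem pvDigitSum4_mod (l : List Char) :
    pvDigitSum4 l % 3 = pvValLE l % 3 := by
  induction l using pvDigitSum4.induct with
  | case1 => rfl
  | case2 => simp [pvDigitSum4, pvValLE, pvBit]
  | case3 x y =>
    simp only [pvDigitSum4, pvValLE, pvBit]
    split_ifs; omega
  | case4 b0 b1 rest ih =>
    simp only [pvDigitSum4, pvValLE, pvBit]
    split_ifs <;> omega

-- ===== VERDICT (by name: the statement is the Claim_ definition above) =====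
theorem binary_divisible_by_3_spec : Claim_equal_binary_divisible_by_3 := by
  intro s _ hp
  unfold Pre_binary_divisible_by_3 at hp
  rw [List.all_eq_true] at hp
  unfold Spec_binary_divisible_by_3 binary_divisible_by_3 binary_divisible_by_3_alt
  have hA : s.toList.any (fun c => !(c == '0' || c == '1')) = false := by
    rw [List.any_eq_false]
    intro c hc
    simp [hp c hc]
  have hB : PySem.Set.issubset (PySem.Set.ofList s.toList) ['0', '1'] = true := by
    rw [PySem.Set.issubset_iff]
    intro c hc
    rw [PySem.Set.mem_ofList] at hc
    have := hp c hc
    rcases Bool.or_eq_true _ _ |>.mp this with h | h <;>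
      simp_all
  rw [hA, hB]
  simp only [Bool.not_true, if_neg Bool.false_ne_true]
  have hAf : (s.toList.foldl
      (fun st bit => PySem.Int.mod (st * 2 + (if bit = '1' then (1 : Int) else 0)) 3) 0)
      = pvHorner s.toList 0 % 3 := by
    have := pvA_fold_mod s.toList 0
    simpa [pvBit] using this
  rw [hAf, pvHorner_eq_valLE_reverse,
    PySem.Int.mod_eq_emod_of_pos (by norm_num : (0:Int) < 3), pvDigitSum4_mod]
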